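-- pv_equiv track=rewrite | github.com/TauWu/backend_learning_notes | LeetCode/Code/Python/5.py | get_length_of_str
-- ===== SOURCE A (Python) =====
-- def get_length_of_str(s):
--     length = len(s)
--     while True:
--         if len(s) <= 1:
--             break
--         if s[0] == s[-1]:
--             s = s[1:-1]
--         else:
--             return 0
--     return length
-- ===== SOURCE B (Python) =====
-- def get_length_of_str(s):
--     return len(s) if s == s[::-1] else 0
-- ===== Notes on version B (the rewrite author's own statement) =====
-- stated objective: faster
-- what changed: Replaces A's repeated end-character comparison with quadratic slicing s[1:-1] by a single reversed-string equality check, returning len(s) iff s is a palindrome.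
import Mathlib
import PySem

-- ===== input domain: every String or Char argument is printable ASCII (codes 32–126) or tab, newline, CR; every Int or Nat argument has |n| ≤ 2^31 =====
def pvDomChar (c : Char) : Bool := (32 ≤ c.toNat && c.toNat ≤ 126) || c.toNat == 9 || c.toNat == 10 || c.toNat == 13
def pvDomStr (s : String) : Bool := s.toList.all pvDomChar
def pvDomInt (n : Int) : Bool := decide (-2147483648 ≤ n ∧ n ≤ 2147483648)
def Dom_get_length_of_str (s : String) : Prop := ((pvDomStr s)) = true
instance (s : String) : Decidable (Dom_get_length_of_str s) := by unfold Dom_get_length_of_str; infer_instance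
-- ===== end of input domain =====

-- B replaces A's quadratic peel-the-ends loop by a single reversed-list equality check (palindrome ⇒ len, else 0).
-- ===== PORT A =====
-- while-loop of A: peel matching end characters off s (s = s[1:-1]) until len(s) <= 1; False on a mismatch.
def pvALoop (l : List Char) : Bool :=
  if l.length ≤ 1 then true
  else if PySem.List.pyGet? l 0 = PySem.List.pyGet? l (-1) then
    pvALoop (PySem.List.slice l (some 1) (some (-1)))
  else false
termination_by l.length
decreasing_by
  simp [PySem.List.length_slice]
  rename_i h _
  have : PySem.List.clampIdx l.length 1 = 1 := by
    simp [PySem.List.clampIdx]; omega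
  omega

def get_length_of_str (s : String) : Int :=
  let length : Int := s.toList.length
  if pvALoop s.toList then length else 0

-- ===== PORT B =====
-- B: len(s) if s == s[::-1] else 0
def get_length_of_str_alt (s : String) : Int :=
  if s.toList = s.toList.reverse then (s.toList.length : Int) else 0

-- ===== PRECONDITION & SPEC =====
def Spec_get_length_of_str (s : String) (out : Int) : Prop := out = get_length_of_str_alt s
instance (s : String) (out : Int) : Decidable (Spec_get_length_of_str s out) := by unfold Spec_get_length_of_str; infer_instance

-- ===== CLAIM (what is proved, stated in full; the proofs are below) =====
def Claim_equal_get_length_of_str : Prop := ∀ (s : String), Dom_get_length_of_str s → Spec_get_length_of_str s (get_length_of_str s)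

-- ===== LEMMAS AND PROOFS =====
theorem pv_decomp {l : List Char} (h : ¬ l.length ≤ 1) :
    ∃ a m b, l = a :: (m ++ [b]) := by
  cases l with
  | nil => simp at h
  | cons a t =>
    rcases t.eq_nil_or_concat with rfl | ⟨m, b, hc⟩
    · simp at h
    · exact ⟨a, m, b, by simp [hc]⟩

theorem pv_getLast (a b : Char) (m : List Char) :
    (a :: (m ++ [b])).getLast? = some b := by
  rw [show a :: (m ++ [b]) = (a :: m) ++ [b] from rfl, List.getLast?_concat]

theorem pv_slice (a b : Char) (m : List Char) :
    PySem.List.slice (a :: (m ++ [b])) (some 1) (some (-1)) = m := by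
  simp [PySem.List.slice, PySem.List.clampIdx]
  have h0 : ¬((m.length : Int) + 1 < 0) := by omega
  simp [h0]

theorem pvALoop_eq_palindrome (l : List Char) : pvALoop l = decide (l = l.reverse) := by
  induction l using pvALoop.induct with
  | case1 l h =>
    rw [pvALoop]
    simp only [if_pos h]
    match l, h with
    | [], _ => simp
    | [c], _ => simp
  | case2 l h heq ih =>
    obtain ⟨a, m, b, rfl⟩ := pv_decomp h
    rw [pvALoop]
    rw [pv_slice] at ih
    simp only [if_neg h, if_pos heq, pv_slice, ih]
    have hab : a = b := by
      have := heq
      rw [PySem.List.pyGet?_neg_one, pv_getLast] at this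
      simpa [PySem.List.pyGet?_zero] using this
    subst hab
    rw [show (a :: (m ++ [a])).reverse = a :: (m.reverse ++ [a]) by simp]
    simp
  | case3 l h heq =>
    obtain ⟨a, m, b, rfl⟩ := pv_decomp h
    rw [pvALoop]
    simp only [if_neg h, if_neg heq]
    have hab : a ≠ b := by
      intro hab
      apply heq
      rw [PySem.List.pyGet?_neg_one, pv_getLast]
      simp [PySem.List.pyGet?_zero, hab]
    rw [show (a :: (m ++ [b])).reverse = b :: (m.reverse ++ [a]) by simp]
    symm
    simp only [decide_eq_false_iff_not]
    intro hc
    exact hab (by injection hc)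

-- ===== VERDICT (by name: the statement is the Claim_ definition above) =====
theorem get_length_of_str_spec : Claim_equal_get_length_of_str := by
  intro s _
  show get_length_of_str s = get_length_of_str_alt s
  simp only [get_length_of_str, get_length_of_str_alt, pvALoop_eq_palindrome,
    decide_eq_true_eq]
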